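-- pv_equiv track=rewrite | github.com/AmrajDhanoa/Amraj-Dhanoa-Boggle | Amraj_Dhanoa_Boogle_Game_Final_With_GUI.py | check_board_letters
-- ===== SOURCE A (Python) =====
-- def check_board_letters(user_word, board):
--     '''(str, list) -> Boolean
--     Takes in one user word at a time and the board,
--     checks if all the characters in the word appear on the board
--     and returns True if they do, otherwise returns False.
--     >>> board = [[D, W, M, I], [A, U, G, P], [Y, N, O, T], [E, R, K, F]]
--     check_board_letters('DUNE', board) -> True '''
--     for char in user_word:
--         valid = False
--         for row in range(4):
--             for col in range(4):
--                 if board[row][col] == char: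
--                     valid = True
--                     break
--             if valid == True:
--                 break
--         if valid != True:
--             return False
--     return True
-- ===== SOURCE B (Python) =====
-- def check_board_letters(user_word, board):
--     # Single pass over the board: discard each cell's letter from the set of
--     # characters still needed; the word is covered iff nothing remains.
--     needed = set(user_word)
--     for row in range(4):
--         if not needed:
--             break
--         for col in range(4):
--             needed.discard(board[row][col])
--     return not needed
-- ===== Notes on version B (the rewrite author's own statement) =====
-- stated objective: alternative
-- what changed: A scans the whole board again for every word character (word-driven repeated grid scans); B inverts the traversal: it builds the set of needed characters once and makes a single pass over the board, discarding each visited cell's letter from that set, answering True iff the needed-set is exhausted.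
-- outside the precondition, e.g. on check_board_letters('A', [['A']]): A returns True, B raises IndexError
import Mathlib
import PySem

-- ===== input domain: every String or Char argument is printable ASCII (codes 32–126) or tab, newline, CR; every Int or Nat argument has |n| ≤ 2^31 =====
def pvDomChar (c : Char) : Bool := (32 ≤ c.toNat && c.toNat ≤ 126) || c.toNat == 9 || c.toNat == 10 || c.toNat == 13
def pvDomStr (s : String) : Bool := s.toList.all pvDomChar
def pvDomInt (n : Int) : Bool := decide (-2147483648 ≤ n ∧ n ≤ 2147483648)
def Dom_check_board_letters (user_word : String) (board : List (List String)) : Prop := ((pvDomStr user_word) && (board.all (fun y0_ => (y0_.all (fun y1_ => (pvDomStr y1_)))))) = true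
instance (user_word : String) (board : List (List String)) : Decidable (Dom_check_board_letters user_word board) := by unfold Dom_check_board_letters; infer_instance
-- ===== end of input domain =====

-- B inverts the traversal: one pass over the board discarding found letters from
-- the set of needed word characters, instead of A's per-character grid scans.

-- ===== PORT A =====

-- board[row][col]; none = Python IndexError (excluded by Pre_)
def pvCell (board : List (List String)) (r c : Int) : Option String :=
  (PySem.List.pyGet? board r).bind (fun row => PySem.List.pyGet? row c)

-- inner 'for col in range(4)' with break-on-match ('valid = True; break')
def cbA_colLoop (board : List (List String)) (row : Int) (ch : String) : List Int → Bool
  | [] => false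
  | c :: cs => if pvCell board row c == some ch then true else cbA_colLoop board row ch cs

-- 'for row in range(4)' with 'if valid == True: break'
def cbA_rowLoop (board : List (List String)) (ch : String) : List Int → Bool
  | [] => false
  | r :: rs => if cbA_colLoop board r ch (PySem.List.pyRange 0 4 1) then true
               else cbA_rowLoop board ch rs

-- 'for char in user_word' with 'if valid != True: return False'
def cbA_charLoop (board : List (List String)) : List Char → Bool
  | [] => true
  | c :: cs => if cbA_rowLoop board (String.singleton c) (PySem.List.pyRange 0 4 1)
               then cbA_charLoop board cs else false

def check_board_letters (user_word : String) (board : List (List String)) : Bool :=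
  cbA_charLoop board user_word.toList

-- ===== PORT B =====

-- inner 'for col in range(4): needed.discard(board[row][col])'
-- (.getD "" is a total stand-in for board[row][col]; always some under Pre_)
def cbB_colLoop (board : List (List String)) (r : Int) (needed : PySem.Set String) :
    List Int → PySem.Set String
  | [] => needed
  | c :: cs => cbB_colLoop board r (PySem.Set.discard needed ((pvCell board r c).getD "")) cs

-- 'for row in range(4)' with 'if not needed: break'
def cbB_rowLoop (board : List (List String)) (needed : PySem.Set String) :
    List Int → PySem.Set String
  | [] => needed
  | r :: rs => if needed.isEmpty then needed
               else cbB_rowLoop board (cbB_colLoop board r needed (PySem.List.pyRange 0 4 1)) rs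

-- needed = set(user_word); single pass; return not needed
def check_board_letters_alt (user_word : String) (board : List (List String)) : Bool :=
  (cbB_rowLoop board (PySem.Set.ofList (user_word.toList.map String.singleton))
    (PySem.List.pyRange 0 4 1)).isEmpty

-- ===== PRECONDITION & SPEC =====
-- Pre_ requires the documented 4x4 board shape (or an empty word, where neither program
-- reads a cell). On undersized boards with a nonempty word A raises IndexError, except when
-- it happens to find every character before reaching a missing cell: that accidental return
-- is an artefact of A's break order, and B raises there (B reads cells the word never needs).
def Pre_check_board_letters (user_word : String) (board : List (List String)) : Prop :=
  user_word = "" ∨ (4 ≤ board.length ∧ ∀ row ∈ board.take 4, 4 ≤ row.length)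
instance (user_word : String) (board : List (List String)) : Decidable (Pre_check_board_letters user_word board) := by unfold Pre_check_board_letters; infer_instance

def pvWitness_check_board_letters : String × List (List String) :=
  ("DUNE", [["D","W","M","I"],["A","U","G","P"],["Y","N","O","T"],["E","R","K","F"]])

def Spec_check_board_letters (user_word : String) (board : List (List String)) (out : Bool) : Prop := out = check_board_letters_alt user_word board
instance (user_word : String) (board : List (List String)) (out : Bool) : Decidable (Spec_check_board_letters user_word board out) := by unfold Spec_check_board_letters; infer_instance

-- ===== CLAIM (what is proved, stated in full; the proofs are below) =====
def Claim_equal_check_board_letters : Prop := ∀ (user_word : String) (board : List (List String)), Dom_check_board_letters user_word board → Pre_check_board_letters user_word board → Spec_check_board_letters user_word board (check_board_letters user_word board)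

-- ===== LEMMAS AND PROOFS =====

lemma pvCell_isSome (board : List (List String))
    (hb : 4 ≤ board.length) (hr4 : ∀ row ∈ board.take 4, 4 ≤ row.length)
    (r c : Int) (hr : r ∈ PySem.List.pyRange 0 4 1) (hc : c ∈ PySem.List.pyRange 0 4 1) :
    (pvCell board r c).isSome := by
  rw [PySem.List.mem_pyRange_one] at hr hc
  lift r to Nat using hr.1 with rn
  lift c to Nat using hc.1 with cn
  have hrn : rn < board.length := by omega
  have hrow : board[rn] ∈ board.take 4 := by
    have := List.getElem_take (xs := board) (i := rn)
      (h := by rw [List.length_take]; omega) (j := 4)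
    rw [← this]
    exact List.getElem_mem _
  have hcn : cn < (board[rn]).length := by
    have := hr4 _ hrow; omega
  simp [pvCell, PySem.List.pyGet?_natCast, hrn, hcn]

lemma colLoop_iff (board : List (List String)) (r : Int) (s : String) (cs : List Int)
    (h : ∀ c ∈ cs, (pvCell board r c).isSome) :
    cbA_colLoop board r s cs = true ↔ ∃ c ∈ cs, (pvCell board r c).getD "" = s := by
  induction cs with
  | nil => simp [cbA_colLoop]
  | cons c cs ih =>
    obtain ⟨v, hv⟩ := Option.isSome_iff_exists.mp (h c (List.mem_cons_self))
    have ih' := ih (fun c hc => h c (List.mem_cons_of_mem _ hc))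
    simp only [cbA_colLoop]
    split_ifs with hif
    · simp only [hv, beq_iff_eq, Option.some.injEq] at hif
      simp [hv, hif]
    · simp only [hv, beq_iff_eq, Option.some.injEq] at hif
      simp [hv, ih']
      exact fun h' => absurd h' hif

lemma rowLoop_iff (board : List (List String)) (s : String) (rs : List Int)
    (h : ∀ r ∈ rs, ∀ c ∈ PySem.List.pyRange 0 4 1, (pvCell board r c).isSome) :
    cbA_rowLoop board s rs = true ↔
      ∃ r ∈ rs, ∃ c ∈ PySem.List.pyRange 0 4 1, (pvCell board r c).getD "" = s := by
  induction rs with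
  | nil => simp [cbA_rowLoop]
  | cons r rs ih =>
    have hcol := colLoop_iff board r s (PySem.List.pyRange 0 4 1) (h r List.mem_cons_self)
    have ih' := ih (fun r hr => h r (List.mem_cons_of_mem _ hr))
    simp only [cbA_rowLoop]
    split_ifs with hif
    · simp only [hcol] at hif
      simpa using Or.inl hif
    · rw [Bool.not_eq_true] at hif
      simp only [List.exists_mem_cons_iff, ih']
      constructor
      · exact Or.inr
      · rintro (hl | hr')
        · exact absurd (hcol.mpr hl) (by simp [hif])
        · exact hr'

lemma charLoop_eq_all (board : List (List String)) (l : List Char) :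
    cbA_charLoop board l =
      l.all (fun c => cbA_rowLoop board (String.singleton c) (PySem.List.pyRange 0 4 1)) := by
  induction l with
  | nil => simp [cbA_charLoop]
  | cons c cs ih =>
    simp only [cbA_charLoop, List.all_cons]
    split_ifs with hif <;> simp [hif, ih]

lemma mem_colLoop (board : List (List String)) (r : Int) (needed : PySem.Set String)
    (cs : List Int) (s : String) :
    s ∈ cbB_colLoop board r needed cs ↔
      s ∈ needed ∧ ∀ c ∈ cs, (pvCell board r c).getD "" ≠ s := by
  induction cs generalizing needed with
  | nil => simp [cbB_colLoop]
  | cons c cs ih =>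
    simp only [cbB_colLoop, ih, PySem.Set.mem_discard, List.forall_mem_cons]
    constructor
    · rintro ⟨⟨hs, hne⟩, hall⟩
      exact ⟨hs, fun h => hne h.symm, hall⟩
    · rintro ⟨hs, hne, hall⟩
      exact ⟨⟨hs, fun h => hne h.symm⟩, hall⟩

lemma mem_rowLoop (board : List (List String)) (needed : PySem.Set String)
    (rs : List Int) (s : String) :
    s ∈ cbB_rowLoop board needed rs ↔
      s ∈ needed ∧ ∀ r ∈ rs, ∀ c ∈ PySem.List.pyRange 0 4 1, (pvCell board r c).getD "" ≠ s := by
  induction rs generalizing needed with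
  | nil => simp [cbB_rowLoop]
  | cons r rs ih =>
    simp only [cbB_rowLoop]
    split_ifs with hif
    · rw [List.isEmpty_iff] at hif
      subst hif
      simp
    · simp only [ih, mem_colLoop, List.forall_mem_cons]
      tauto

-- ===== VERDICT (by name: the statement is the Claim_ definition above) =====
theorem check_board_letters_spec : Claim_equal_check_board_letters := by
  intro user_word board _ hpre
  show check_board_letters user_word board = check_board_letters_alt user_word board
  rcases hpre with hempty | ⟨hb, hr4⟩
  · subst hempty
    rfl
  have hsome := pvCell_isSome board hb hr4
  unfold check_board_letters check_board_letters_alt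
  rw [charLoop_eq_all, Bool.eq_iff_iff, List.isEmpty_iff, List.eq_nil_iff_forall_not_mem]
  simp only [List.all_eq_true]
  constructor
  · intro hall s hs
    rw [mem_rowLoop] at hs
    obtain ⟨hmem, hnone⟩ := hs
    rw [PySem.Set.mem_ofList, List.mem_map] at hmem
    obtain ⟨ch, hch, rfl⟩ := hmem
    have := (rowLoop_iff board (String.singleton ch) _
      (fun r hr c hc => hsome r c hr hc)).mp (hall ch hch)
    obtain ⟨r, hr, c, hc, hcell⟩ := this
    exact hnone r hr c hc hcell
  · intro hnone ch hch
    rw [rowLoop_iff board _ _ (fun r hr c hc => hsome r c hr hc)]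
    by_contra hno
    push_neg at hno
    exact hnone (String.singleton ch) (by
      rw [mem_rowLoop]
      refine ⟨by rw [PySem.Set.mem_ofList, List.mem_map]; exact ⟨ch, hch, rfl⟩, ?_⟩
      intro r hr c hc
      exact hno r hr c hc)
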